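-- pv_equiv track=rewrite | github.com/blindpub/DriveE2E | Bench2DriveZoo/mmcv/datasets/drivee2e_generate_splits.py | split_list_by_ratio
-- ===== SOURCE A (Python) =====
-- def split_list_by_ratio(input_list):
--     list1, list2 = [], []
--     i = 0
--     while i < len(input_list):
--         list1.extend(input_list[i:i+2])
--         i += 2
--         list2.extend(input_list[i:i+1])
--         i += 1
--
--     return list1, list2
-- ===== SOURCE B (Python) =====
-- def split_list_by_ratio(input_list):
--     list1 = [x for i, x in enumerate(input_list) if i % 3 != 2]
--     list2 = [x for i, x in enumerate(input_list) if i % 3 == 2]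
--     return list1, list2
-- ===== Notes on version B (the rewrite author's own statement) =====
-- stated objective: simpler
-- what changed: Replaced A's stride loop (advance index by 2 then 1, slice-extend two accumulators) with positional classification: two comprehensions bucket each element by its index modulo 3.
import Mathlib
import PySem

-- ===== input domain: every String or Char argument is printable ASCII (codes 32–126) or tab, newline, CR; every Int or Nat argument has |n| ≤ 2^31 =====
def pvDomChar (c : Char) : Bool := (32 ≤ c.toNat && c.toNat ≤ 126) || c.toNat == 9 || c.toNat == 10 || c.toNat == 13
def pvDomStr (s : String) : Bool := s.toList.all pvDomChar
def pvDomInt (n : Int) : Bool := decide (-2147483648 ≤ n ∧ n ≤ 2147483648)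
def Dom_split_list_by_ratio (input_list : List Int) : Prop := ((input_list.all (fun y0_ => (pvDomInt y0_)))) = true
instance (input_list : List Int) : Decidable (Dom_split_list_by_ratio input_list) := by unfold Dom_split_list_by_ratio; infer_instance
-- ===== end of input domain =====

-- B replaces A's stride loop (slice-extend two accumulators, index advancing 2 then 1) with
-- positional classification: each element goes to list1 or list2 according to its index mod 3 (objective: simpler).

-- ===== PORT A =====
-- A's while loop: i advances by 2 then by 1 per iteration; list1 gets input_list[i:i+2], list2 gets input_list[i+2:i+3].
def pvLoopA (input_list : List Int) (i : Nat) (l1 l2 : List Int) : List Int × List Int :=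
  if _h : i < input_list.length then
    pvLoopA input_list (i + 3)
      (l1 ++ PySem.List.slice input_list (some (i : Int)) (some ((i : Int) + 2)))
      (l2 ++ PySem.List.slice input_list (some ((i : Int) + 2)) (some ((i : Int) + 3)))
  else (l1, l2)
termination_by input_list.length - i

def split_list_by_ratio (input_list : List Int) : List Int × List Int :=
  pvLoopA input_list 0 [] []

-- ===== PORT B =====
def split_list_by_ratio_alt (input_list : List Int) : List Int × List Int :=
  (((PySem.List.enumerate input_list 0).filter (fun p => p.1 % 3 != 2)).map (·.2),
   ((PySem.List.enumerate input_list 0).filter (fun p => p.1 % 3 == 2)).map (·.2))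

-- ===== PRECONDITION & SPEC =====
def Spec_split_list_by_ratio (input_list : List Int) (out : List Int × List Int) : Prop := out = split_list_by_ratio_alt input_list
instance (input_list : List Int) (out : List Int × List Int) : Decidable (Spec_split_list_by_ratio input_list out) := by unfold Spec_split_list_by_ratio; infer_instance

-- ===== CLAIM (what is proved, stated in full; the proofs are below) =====
def Claim_equal_split_list_by_ratio : Prop := ∀ (input_list : List Int), Dom_split_list_by_ratio input_list → Spec_split_list_by_ratio input_list (split_list_by_ratio input_list)

-- ===== LEMMAS AND PROOFS =====

-- common reference shape: consume three elements at a time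
def pvChunk3 : List Int → List Int × List Int
  | [] => ([], [])
  | [a] => ([a], [])
  | [a, b] => ([a, b], [])
  | a :: b :: c :: r => ((pvChunk3 r).1.cons b |>.cons a, (pvChunk3 r).2.cons c)

lemma pvLoopA_eq (xs : List Int) : ∀ n i l1 l2, xs.length - i ≤ n →
    pvLoopA xs i l1 l2 = (l1 ++ (pvChunk3 (xs.drop i)).1, l2 ++ (pvChunk3 (xs.drop i)).2) := by
  intro n
  induction n with
  | zero =>
    intro i l1 l2 h
    rw [pvLoopA]
    have hge : xs.length ≤ i := by omega
    simp [Nat.not_lt.mpr hge, List.drop_eq_nil_of_le hge, pvChunk3]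
  | succ n ih =>
    intro i l1 l2 h
    rw [pvLoopA]
    by_cases hi : i < xs.length
    · simp only [hi, dif_pos]
      rw [ih (i + 3) _ _ (by omega)]
      have h2 : PySem.List.slice xs (some (i : Int)) (some ((i : Int) + 2)) = (xs.drop i).take 2 := by
        have := PySem.List.slice_natCast_add xs i 2; push_cast at this ⊢; rw [this]
      have h3 : PySem.List.slice xs (some ((i : Int) + 2)) (some ((i : Int) + 3)) = (xs.drop (i + 2)).take 1 := by
        have := PySem.List.slice_natCast xs (i + 2) (i + 3); push_cast at this ⊢; rw [this]; congr 1; omega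
      rw [h2, h3]
      have hd2 : xs.drop (i + 2) = (xs.drop i).drop 2 := by simp [List.drop_drop]
      have hd3 : xs.drop (i + 3) = (xs.drop i).drop 3 := by simp [List.drop_drop]
      rw [hd2, hd3]
      have hne : xs.drop i ≠ [] := by
        intro hnil
        have := List.length_drop (l := xs) (i := i)
        rw [hnil] at this; simp at this; omega
      -- case on the shape of xs.drop i (up to three leading elements)
      match hys : xs.drop i with
      | [] => exact absurd hys hne
      | [a] => simp [pvChunk3]
      | [a, b] => simp [pvChunk3]
      | a :: b :: c :: r => simp [pvChunk3]
    · simp only [hi, dif_neg, not_false_iff]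
      have hge : xs.length ≤ i := by omega
      simp [List.drop_eq_nil_of_le hge, pvChunk3]

lemma pvAltFilter_eq (xs : List Int) : ∀ s : Int, 0 ≤ s → s % 3 = 0 →
    (((PySem.List.enumerate xs s).filter (fun p => p.1 % 3 != 2)).map (·.2),
     ((PySem.List.enumerate xs s).filter (fun p => p.1 % 3 == 2)).map (·.2)) = pvChunk3 xs := by
  induction xs using pvChunk3.induct with
  | case1 => intro s _ _; simp [PySem.List.enumerate_nil, pvChunk3]
  | case2 a =>
    intro s hs h3
    have h1 : s % 3 != 2 := by simp [h3]
    simp [PySem.List.enumerate_cons, PySem.List.enumerate_nil, pvChunk3, h3]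
  | case3 a b =>
    intro s hs h3
    have h1 : (s + 1) % 3 = 1 := by omega
    simp [PySem.List.enumerate_cons, PySem.List.enumerate_nil, pvChunk3, h3, h1]
  | case4 a b c r ih =>
    intro s hs h3
    have h1 : (s + 1) % 3 = 1 := by omega
    have h2 : (s + 1 + 1) % 3 = 2 := by omega
    have ih' := ih (s + 1 + 1 + 1) (by omega) (by omega)
    simp only [PySem.List.enumerate_cons, List.filter_cons, h3, h1, h2,
      pvChunk3] at ih' ⊢
    rw [Prod.ext_iff] at ih'
    simp at ih' ⊢
    exact ⟨ih'.1, ih'.2⟩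

-- ===== VERDICT (by name: the statement is the Claim_ definition above) =====
theorem split_list_by_ratio_spec : Claim_equal_split_list_by_ratio := by
  intro input_list _
  unfold Spec_split_list_by_ratio split_list_by_ratio split_list_by_ratio_alt
  rw [pvLoopA_eq input_list input_list.length 0 [] [] (by omega)]
  rw [pvAltFilter_eq input_list 0 (by omega) (by omega)]
  simp
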